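-- pv_equiv track=rewrite | github.com/coscoo/Projects | anagame/AnaGame.py | ch_to_prime
-- ===== SOURCE A (Python) =====
-- def ch_to_prime(word):
--     ch_to_prime= {'a': 2, 'b': 3, 'c': 5, 'd': 7, 'e': 11, 'f': 13,
--         'g': 17, 'h': 19, 'i': 23, 'j': 29, 'k': 31, 'l': 37, 'm': 41, 'n': 43,
--         'o': 47, 'p': 53, 'q': 59, 'r': 61, 's': 67, 't': 71, 'u': 73, 'v': 79,
--         'w': 83, 'x': 89, 'y': 97, 'z': 101 }
--     prime_keys = 1
--     for y in word:
--         prime_keys = ch_to_prime[y] * prime_keys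
--     return prime_keys
-- ===== SOURCE B (Python) =====
-- def ch_to_prime(word):
--     primes = [2, 3, 5, 7, 11, 13, 17, 19, 23, 29, 31, 37, 41, 43,
--               47, 53, 59, 61, 67, 71, 73, 79, 83, 89, 97, 101]
--     product = 1
--     for c in sorted(set(word)):
--         product *= primes[ord(c) - 97] ** word.count(c)
--     return product
-- ===== Notes on version B (the rewrite author's own statement) =====
-- stated objective: alternative
-- what changed: B replaces the letter->prime dict scan with a flat prime list indexed by ord(c)-97 and multiplies primes[ord(c)-97] ** word.count(c) over the sorted distinct letters, instead of A's one dict lookup and one multiplication per character.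
import Mathlib
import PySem

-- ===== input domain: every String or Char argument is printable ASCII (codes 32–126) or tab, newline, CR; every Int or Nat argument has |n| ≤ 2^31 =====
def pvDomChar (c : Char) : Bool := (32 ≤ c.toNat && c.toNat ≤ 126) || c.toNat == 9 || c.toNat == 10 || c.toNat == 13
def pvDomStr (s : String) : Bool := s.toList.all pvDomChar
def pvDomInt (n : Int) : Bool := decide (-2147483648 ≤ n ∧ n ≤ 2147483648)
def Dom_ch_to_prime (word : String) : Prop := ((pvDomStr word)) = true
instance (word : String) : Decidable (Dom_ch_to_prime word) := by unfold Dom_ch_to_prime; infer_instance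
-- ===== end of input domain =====

-- B drops the letter→prime dict for a flat prime list indexed by ord(c)-97 and multiplies
-- primes[ord(c)-97] ** word.count(c) over the sorted distinct letters (objective: alternative).

-- ===== PORT A =====
-- the letter→prime dict A defines; ch_to_prime[y] raises KeyError outside 'a'-'z' (excluded by Pre_,
-- so getD's default 0 is unreachable there)
def pvPrimes : PySem.Dict Char Int := PySem.Dict.ofList
  [('a', 2), ('b', 3), ('c', 5), ('d', 7), ('e', 11), ('f', 13),
   ('g', 17), ('h', 19), ('i', 23), ('j', 29), ('k', 31), ('l', 37), ('m', 41), ('n', 43),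
   ('o', 47), ('p', 53), ('q', 59), ('r', 61), ('s', 67), ('t', 71), ('u', 73), ('v', 79),
   ('w', 83), ('x', 89), ('y', 97), ('z', 101)]

def ch_to_prime (word : String) : Int :=
  word.toList.foldl (fun prime_keys y => pvPrimes.getD y 0 * prime_keys) 1

-- ===== PORT B =====
def pvPrimeList : List Int :=
  [2, 3, 5, 7, 11, 13, 17, 19, 23, 29, 31, 37, 41, 43,
   47, 53, 59, 61, 67, 71, 73, 79, 83, 89, 97, 101]

-- primes[ord(c) - 97] via pyGet? (Python's negative-index wrap); inside Pre_ the index is in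
-- range, so the .getD 0 default (Python's IndexError) is unreachable
def ch_to_prime_alt (word : String) : Int :=
  (PySem.List.sorted (PySem.Set.ofList word.toList) (fun x => x) false).foldl
    (fun product c =>
      product * (PySem.List.pyGet? pvPrimeList ((c.toNat : Int) - 97)).getD 0 ^ word.toList.count c) 1

-- ===== PRECONDITION & SPEC =====
-- Pre_ excludes words containing a character that is not a lowercase ASCII letter, on which A raises KeyError
def Pre_ch_to_prime (word : String) : Prop :=
  (word.toList.all fun c => decide (97 ≤ c.toNat) && decide (c.toNat ≤ 122)) = true
instance (word : String) : Decidable (Pre_ch_to_prime word) := by unfold Pre_ch_to_prime; infer_instance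
def pvWitness_ch_to_prime : String := "cab"

def Spec_ch_to_prime (word : String) (out : Int) : Prop := out = ch_to_prime_alt word
instance (word : String) (out : Int) : Decidable (Spec_ch_to_prime word out) := by unfold Spec_ch_to_prime; infer_instance

-- ===== CLAIM (what is proved, stated in full; the proofs are below) =====
def Claim_equal_ch_to_prime : Prop := ∀ (word : String), Dom_ch_to_prime word → Pre_ch_to_prime word → Spec_ch_to_prime word (ch_to_prime word)

-- ===== LEMMAS AND PROOFS =====

-- A's loop is the product of pr over the characters
theorem pv_foldl_mul_left (pr : Char → Int) (l : List Char) (a : Int) :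
    l.foldl (fun acc y => pr y * acc) a = (l.map pr).prod * a := by
  induction l generalizing a with
  | nil => simp
  | cons x l ih => simp [List.foldl, ih]; ring

-- B's loop is the product of g over the distinct letters
theorem pv_foldl_mul_right {α : Type} (g : α → Int) (l : List α) (a : Int) :
    l.foldl (fun acc c => acc * g c) a = a * (l.map g).prod := by
  induction l generalizing a with
  | nil => simp
  | cons x l ih => simp [List.foldl, ih]; ring

-- product of pr^count over the distinct letters = product of pr over all letters
theorem pv_prod_pow_count (pr : Char → Int) (l : List Char) :
    ((PySem.Set.ofList l).map (fun k => pr k ^ l.count k)).prod = (l.map pr).prod := by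
  rw [Finset.prod_list_map_count l pr]
  have hfin : l.toFinset = (PySem.Set.ofList l : List Char).toFinset := by
    ext x; simp [PySem.Set.mem_ofList]
  rw [hfin, List.prod_toFinset _ (PySem.Set.nodup_ofList l)]

-- on lowercase letters the flat prime list agrees with A's dict
theorem pv_dict_list_agree (c : Char) (h1 : 97 ≤ c.toNat) (h2 : c.toNat ≤ 122) :
    (PySem.List.pyGet? pvPrimeList ((c.toNat : Int) - 97)).getD 0 = pvPrimes.getD c 0 := by
  have hc : c = Char.ofNat c.toNat := (Char.ofNat_toNat c).symm
  rw [hc]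
  have hb : ((List.range 26).all fun k =>
      (PySem.List.pyGet? pvPrimeList ((k : Int))).getD 0 == pvPrimes.getD (Char.ofNat (97 + k)) 0) = true := by
    decide
  have hk : c.toNat - 97 < 26 := by omega
  have := List.all_eq_true.mp hb (c.toNat - 97) (List.mem_range.mpr hk)
  have he : 97 + (c.toNat - 97) = c.toNat := by omega
  have hi : ((c.toNat - 97 : Nat) : Int) = (c.toNat : Int) - 97 := by omega
  rw [he, hi] at this
  simpa using this

-- ===== VERDICT (by name: the statement is the Claim_ definition above) =====
theorem ch_to_prime_spec : Claim_equal_ch_to_prime := by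
  intro word _ hpre
  unfold Spec_ch_to_prime ch_to_prime ch_to_prime_alt
  rw [pv_foldl_mul_left (fun y => pvPrimes.getD y 0) word.toList 1,
      pv_foldl_mul_right (fun c => (PySem.List.pyGet? pvPrimeList ((c.toNat : Int) - 97)).getD 0 ^ word.toList.count c)]
  have hperm : (PySem.List.sorted (PySem.Set.ofList word.toList) (fun x => x) false).Perm
      (PySem.Set.ofList word.toList) := PySem.List.sorted_perm _ _ _
  rw [(hperm.map _).prod_eq]
  have hmap : (PySem.Set.ofList word.toList).map
        (fun c => (PySem.List.pyGet? pvPrimeList ((c.toNat : Int) - 97)).getD 0 ^ word.toList.count c)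
      = (PySem.Set.ofList word.toList).map
        (fun c => pvPrimes.getD c 0 ^ word.toList.count c) := by
    apply List.map_congr_left
    intro c hc
    have hmem : c ∈ word.toList := (PySem.Set.mem_ofList _ _).mp hc
    have := List.all_eq_true.mp hpre c hmem
    simp only [Bool.and_eq_true, decide_eq_true_eq] at this
    rw [pv_dict_list_agree c this.1 this.2]
  rw [hmap, pv_prod_pow_count (fun y => pvPrimes.getD y 0) word.toList]
  ring
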